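-- pv_equiv track=rewrite | github.com/WinningEdge-AI/WinningEdge | winodds/add_aggression_column.py | check_aggression
-- ===== SOURCE A (Python) =====
-- def check_aggression(action_list):
--     """
--     This function looks at the actions that happened and outputs a 2 digit number
--     The number represents aggression show by either player
--
--     Player counts as aggressive if they raised or bet
--
--     Ex:
--     00 - means both passive
--     10 means SB aggressive BB passive
--     01 means SB passive BB aggressive
--     11 means both aggressive
--     """
--     agg_sb=0
--     agg_bb =0
--
--     if action_list==None:
--         return None
--     for index,action in enumerate(action_list):
--         if action[0] in ('r','b'):
--             if index %2==0:
--                 agg_sb=1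
--             else:
--                 agg_bb=1
--     return agg_sb, agg_bb
-- ===== SOURCE B (Python) =====
-- def check_aggression(action_list):
--     """Same result as A: flag SB/BB aggression, but via parity slices instead of one interleaved loop."""
--     if action_list is None:
--         return None
--     agg_sb = int(any(a[0] in ('r', 'b') for a in action_list[::2]))
--     agg_bb = int(any(a[0] in ('r', 'b') for a in action_list[1::2]))
--     return agg_sb, agg_bb
-- ===== Notes on version B (the rewrite author's own statement) =====
-- stated objective: simpler
-- what changed: Replaces the interleaved enumerate loop with index-parity branching by two independent any() scans over the even slice [::2] and odd slice [1::2].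
import Mathlib
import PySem

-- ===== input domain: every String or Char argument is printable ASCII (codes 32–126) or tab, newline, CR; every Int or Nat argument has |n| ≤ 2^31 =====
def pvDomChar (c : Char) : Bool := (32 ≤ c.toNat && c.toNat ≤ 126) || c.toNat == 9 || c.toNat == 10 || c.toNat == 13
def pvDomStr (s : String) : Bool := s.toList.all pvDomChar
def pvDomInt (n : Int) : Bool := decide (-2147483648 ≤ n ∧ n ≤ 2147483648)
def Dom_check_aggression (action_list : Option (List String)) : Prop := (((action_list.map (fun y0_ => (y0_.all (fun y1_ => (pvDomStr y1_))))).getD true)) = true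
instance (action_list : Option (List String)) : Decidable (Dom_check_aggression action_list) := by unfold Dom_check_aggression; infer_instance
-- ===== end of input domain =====

-- B computes the same SB/BB aggression flags via two parity slices ([::2], [1::2]) with any(), instead of A's single enumerate loop branching on index parity.


-- ===== PORT A =====
-- A: enumerate loop with state (agg_sb, agg_bb), branching on index % 2.
def check_aggression (action_list : Option (List String)) : Option (Int × Int) :=
  match action_list with
  | none => none
  | some l =>
    let st := (PySem.List.enumerate l).foldl
      (fun (st : Int × Int) (ia : Int × String) =>
        if (PySem.Str.pyGet? ia.2 0 == some 'r' || PySem.Str.pyGet? ia.2 0 == some 'b') then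
          if PySem.Int.mod ia.1 2 = 0 then (1, st.2) else (st.1, 1)
        else st) ((0 : Int), (0 : Int))
    some st

-- ===== PORT B =====
-- B: int(any(a[0] in ('r','b') for a in xs))
def pvAggFlag (xs : List String) : Int :=
  if xs.any (fun a => PySem.Str.pyGet? a 0 == some 'r' || PySem.Str.pyGet? a 0 == some 'b') then 1 else 0

def check_aggression_alt (action_list : Option (List String)) : Option (Int × Int) :=
  match action_list with
  | none => none
  | some l =>
    match PySem.List.slice? l none none 2, PySem.List.slice? l (some 1) none 2 with
    | some sb, some bb => some (pvAggFlag sb, pvAggFlag bb)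
    | _, _ => none   -- unreachable: step 2 ≠ 0

-- ===== PRECONDITION & SPEC =====
-- Pre_ excludes lists containing an empty string: there `action[0]` raises IndexError in A (and a[0] in B).
def Pre_check_aggression (action_list : Option (List String)) : Prop :=
  ∀ l, action_list = some l → ∀ a ∈ l, a ≠ ""
instance (action_list : Option (List String)) : Decidable (Pre_check_aggression action_list) := by unfold Pre_check_aggression; infer_instance
def pvWitness_check_aggression : Option (List String) := some ["raise", "call", "bet", "fold"]

def Spec_check_aggression (action_list : Option (List String)) (out : Option (Int × Int)) : Prop := out = check_aggression_alt action_list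
instance (action_list : Option (List String)) (out : Option (Int × Int)) : Decidable (Spec_check_aggression action_list out) := by unfold Spec_check_aggression; infer_instance

-- ===== CLAIM (what is proved, stated in full; the proofs are below) =====
def Claim_equal_check_aggression : Prop := ∀ (action_list : Option (List String)), Dom_check_aggression action_list → Pre_check_aggression action_list → Spec_check_aggression action_list (check_aggression action_list)

-- ===== LEMMAS AND PROOFS =====

-- the even-index sublist, structurally
def pvEvens {α : Type} : List α → List α
  | [] => []
  | [x] => [x]
  | x :: _ :: xs => x :: pvEvens xs

lemma pv_fmNat {α : Type} : ∀ (l : List α),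
    List.filterMap (fun k => l[2*k]?) (List.range ((l.length+1)/2)) = pvEvens l
  | [] => by simp [pvEvens]
  | [x] => by simp [pvEvens]
  | x :: y :: xs => by
    have h : (x :: y :: xs).length + 1 = (xs.length + 1) + 2 := by simp
    rw [h, show ((xs.length + 1) + 2)/2 = (xs.length+1)/2 + 1 by omega,
       List.range_succ_eq_map]
    simp only [List.filterMap_cons, List.filterMap_map]
    simp only [Function.comp]
    have : List.filterMap (fun k => (x :: y :: xs)[2*(k+1)]?) (List.range ((xs.length+1)/2))
        = List.filterMap (fun k => xs[2*k]?) (List.range ((xs.length+1)/2)) := by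
      apply List.filterMap_congr
      intro a _
      have : 2*(a+1) = 2*a+2 := by omega
      simp [this]
    simp [pvEvens, this, pv_fmNat xs]

lemma pv_slice_even {α : Type} (l : List α) : PySem.List.slice? l none none 2 = some (pvEvens l) := by
  simp only [PySem.List.slice?, PySem.List.sliceIndices]
  norm_num
  rw [← pv_fmNat l]
  congr 1
  rcases Nat.eq_zero_or_pos l.length with h | h
  · simp [h]
  · simp only [if_pos h]
    have : ((l.length:Int) + 2 - 1) = ((l.length + 1 : Nat) : Int) := by push_cast; ring
    rw [this, show ((2:Int)) = ((2:Nat):Int) by norm_num, ← Int.natCast_div, Int.toNat_natCast]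

lemma pv_slice_odd {α : Type} (l : List α) : PySem.List.slice? l (some 1) none 2 = some (pvEvens l.tail) := by
  simp only [PySem.List.slice?, PySem.List.sliceIndices]
  norm_num
  cases l with
  | nil => simp [pvEvens]
  | cons x xs =>
    simp only [List.tail_cons]
    rw [← pv_fmNat xs]
    have hm : min (1:Int) ((x::xs).length:Int) = 1 := by simp
    rw [hm]
    have hf : (fun k : Nat => (x::xs)[((1:Int) + 2 * (k:Int)).toNat]?) = (fun k : Nat => xs[2*k]?) := by
      funext k
      have : ((1:Int) + 2 * (k:Int)).toNat = 2*k+1 := by omega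
      simp [this]
    rw [hf]
    congr 1
    rcases Nat.eq_zero_or_pos xs.length with h | h
    · simp [h]
    · have h1 : 1 < (x::xs).length := by simp [h]
      simp only [if_pos h1]
      have : ((x::xs).length:Int) - 1 + 2 - 1 = ((xs.length + 1 : Nat) : Int) := by
        push_cast [List.length_cons]; ring
      rw [this, show ((2:Int)) = ((2:Nat):Int) by norm_num, ← Int.natCast_div, Int.toNat_natCast]

-- the per-action aggression test, abbreviated for the loop lemma
def pvHit (a : String) : Bool :=
  PySem.Str.pyGet? a 0 == some 'r' || PySem.Str.pyGet? a 0 == some 'b'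

lemma pv_t1 : (false = true) = False := by simp
lemma pv_t2 : (true = true) = True := by simp
lemma pv_t3 : (((0:Int)) = 0) = True := by simp
lemma pv_t4 : (((1:Int)) = 0) = False := by norm_num

lemma pvEvens_cons {α : Type} (y : α) (xs : List α) : pvEvens (y :: xs) = y :: pvEvens xs.tail := by
  cases xs <;> rfl

lemma pv_foldA : ∀ (l : List String) (i sb bb : Int), PySem.Int.mod i 2 = 0 →
    (PySem.List.enumerate l i).foldl
      (fun (st : Int × Int) (ia : Int × String) =>
        if (PySem.Str.pyGet? ia.2 0 == some 'r' || PySem.Str.pyGet? ia.2 0 == some 'b') then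
          if PySem.Int.mod ia.1 2 = 0 then (1, st.2) else (st.1, 1)
        else st) (sb, bb)
    = (if (pvEvens l).any pvHit then 1 else sb,
       if (pvEvens l.tail).any pvHit then 1 else bb)
  | [], i, sb, bb, hi => by
    simp [PySem.List.enumerate_nil, pvEvens]
  | [x], i, sb, bb, hi => by
    simp only [PySem.List.enumerate_cons, PySem.List.enumerate_nil, List.foldl_cons,
      List.foldl_nil, pvEvens, List.tail_cons, List.any_cons, List.any_nil, pvHit,
      Bool.or_false, hi]
    cases hx : (PySem.Str.pyGet? x 0 == some 'r' || PySem.Str.pyGet? x 0 == some 'b') <;>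
      simp only [pv_t1, pv_t2, pv_t3, if_true, if_false]
  | x :: y :: xs, i, sb, bb, hi => by
    have hmod : PySem.Int.mod i 2 = i % 2 := PySem.Int.mod_eq_emod_of_pos (by norm_num)
    have hi1 : PySem.Int.mod (i+1) 2 = 1 := by
      rw [PySem.Int.mod_eq_emod_of_pos (by norm_num)]; rw [hmod] at hi; omega
    have hi2 : PySem.Int.mod (i+2) 2 = 0 := by
      rw [PySem.Int.mod_eq_emod_of_pos (by norm_num)]; rw [hmod] at hi; omega
    simp only [PySem.List.enumerate_cons, List.foldl_cons]
    rw [hi, hi1]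
    cases hx : (PySem.Str.pyGet? x 0 == some 'r' || PySem.Str.pyGet? x 0 == some 'b') <;>
    cases hy : (PySem.Str.pyGet? y 0 == some 'r' || PySem.Str.pyGet? y 0 == some 'b') <;>
      simp only [pv_t1, pv_t2, pv_t3, pv_t4, if_true, if_false] <;>
      rw [show i + 1 + 1 = i + 2 by ring, pv_foldA xs (i+2) _ _ hi2] <;>
      simp only [pvEvens, pvEvens_cons, List.tail_cons, List.any_cons, pvHit, hx, hy,
        Bool.true_or, Bool.false_or, pv_t2, if_true, ite_self]

-- ===== VERDICT (by name: the statement is the Claim_ definition above) =====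
theorem check_aggression_spec : Claim_equal_check_aggression := by
  intro action_list _ _
  cases action_list with
  | none => rfl
  | some l =>
    unfold Spec_check_aggression check_aggression check_aggression_alt
    dsimp only
    rw [pv_slice_even, pv_slice_odd]
    simp only [pv_foldA l 0 0 0 (by decide)]
    simp [pvAggFlag, pvHit]
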